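-- pv_equiv track=rewrite | github.com/aaroncelestian/XRDmatch | utils/local_database.py | _split_cif_blocks
-- ===== SOURCE A (Python) =====
-- from typing import Dict, List, Optional, Tuple
--
-- def _split_cif_blocks(content: str) -> List[str]:
--     """Split multi-block CIF file into individual CIF blocks"""
--     blocks = []
--     current_block = []
--
--     lines = content.split('\n')
--     in_block = False
--
--     for line in lines:
--         line = line.strip()
--
--         if line.startswith('data_'):
--             # Start of new block
--             if in_block and current_block:
--                 # Save previous block
--                 blocks.append('\n'.join(current_block))
--
--             # Start new block
--             current_block = [line]
--             in_block = True
--         elif in_block: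
--             current_block.append(line)
--
--     # Add the last block
--     if in_block and current_block:
--         blocks.append('\n'.join(current_block))
--
--     return blocks
-- ===== SOURCE B (Python) =====
-- def _split_cif_blocks(content: str):
--     """Split multi-block CIF file into individual CIF blocks"""
--     lines = [line.strip() for line in content.split('\n')]
--     starts = [i for i, line in enumerate(lines) if line.startswith('data_')]
--     ends = starts[1:] + [len(lines)]
--     return ['\n'.join(lines[s:e]) for s, e in zip(starts, ends)]
-- ===== Notes on version B (the rewrite author's own statement) =====
-- stated objective: idiomatic
-- what changed: Replaces A's stateful fold (in_block flag + mutable current_block accumulator) by an index-based decomposition: strip all lines once, collect the positions of block-start lines, and emit each block as a join of the slice between consecutive start positions.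
import Mathlib
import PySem

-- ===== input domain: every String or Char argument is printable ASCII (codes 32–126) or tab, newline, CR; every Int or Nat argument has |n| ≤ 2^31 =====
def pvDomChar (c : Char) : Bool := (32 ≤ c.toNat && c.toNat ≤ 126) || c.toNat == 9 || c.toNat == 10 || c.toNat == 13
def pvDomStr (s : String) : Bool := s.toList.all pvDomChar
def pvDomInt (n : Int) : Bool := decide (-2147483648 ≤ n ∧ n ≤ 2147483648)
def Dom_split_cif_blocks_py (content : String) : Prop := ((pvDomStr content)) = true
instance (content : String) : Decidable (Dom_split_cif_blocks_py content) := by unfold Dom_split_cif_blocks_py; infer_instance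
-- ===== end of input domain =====

-- B replaces A's stateful fold (in_block flag + growing current_block) by an index-based
-- decomposition: strip all lines, collect the block-start line positions, slice between them (idiomatic).

-- shared primitive: content.split('\n') — sep "\n" is nonempty, so Str.split? is always `some`
def pvSplitNL (content : String) : List String := (PySem.Str.split? content "\n").getD []

-- ===== PORT A =====
def split_cif_blocks_py (content : String) : List String :=
  let lines := pvSplitNL content
  let st := lines.foldl (fun (s : List String × List String × Bool) line =>
      let line := PySem.Str.strip line
      if PySem.Str.startswith line "data_" then
        ((if s.2.2 && !s.2.1.isEmpty then s.1 ++ [PySem.Str.join "\n" s.2.1] else s.1), [line], true)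
      else if s.2.2 then (s.1, s.2.1 ++ [line], s.2.2)
      else s) ([], [], false)
  if st.2.2 && !st.2.1.isEmpty then st.1 ++ [PySem.Str.join "\n" st.2.1] else st.1

-- ===== PORT B =====
def split_cif_blocks_py_alt (content : String) : List String :=
  let lines := (pvSplitNL content).map PySem.Str.strip
  let starts := ((PySem.List.enumerate lines 0).filter
      (fun p => PySem.Str.startswith p.2 "data_")).map Prod.fst
  let ends := starts.drop 1 ++ [(lines.length : Int)]
  (starts.zip ends).map (fun p => PySem.Str.join "\n" (PySem.List.slice lines (some p.1) (some p.2)))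

-- ===== PRECONDITION & SPEC =====
def Spec_split_cif_blocks_py (content : String) (out : List String) : Prop := out = split_cif_blocks_py_alt content
instance (content : String) (out : List String) : Decidable (Spec_split_cif_blocks_py content out) := by unfold Spec_split_cif_blocks_py; infer_instance

-- ===== CLAIM (what is proved, stated in full; the proofs are below) =====
def Claim_equal_split_cif_blocks_py : Prop := ∀ (content : String), Dom_split_cif_blocks_py content → Spec_split_cif_blocks_py content (split_cif_blocks_py content)

-- ===== LEMMAS AND PROOFS =====

-- shorthand predicate for "stripped line opens a block"
def pvIsStart (l : String) : Bool := PySem.Str.startswith l "data_"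

-- canonical recursive description of the block list of a list of (stripped) lines
def pvBlocks : List String → List String
  | [] => []
  | l :: rest =>
      if pvIsStart l then
        PySem.Str.join "\n" (l :: rest.takeWhile (fun x => !pvIsStart x)) :: pvBlocks rest
      else pvBlocks rest

-- A's pure fold step (on an already-stripped line) and finaliser
def pvStep (s : List String × List String × Bool) (line : String) : List String × List String × Bool :=
  if pvIsStart line then
    ((if s.2.2 && !s.2.1.isEmpty then s.1 ++ [PySem.Str.join "\n" s.2.1] else s.1), [line], true)
  else if s.2.2 then (s.1, s.2.1 ++ [line], s.2.2)
  else s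

def pvFin (st : List String × List String × Bool) : List String :=
  if st.2.2 && !st.2.1.isEmpty then st.1 ++ [PySem.Str.join "\n" st.2.1] else st.1

theorem pvA_true (ls : List String) : ∀ (bs cur : List String), cur ≠ [] →
    pvFin (ls.foldl pvStep (bs, cur, true)) =
      bs ++ PySem.Str.join "\n" (cur ++ ls.takeWhile (fun x => !pvIsStart x)) :: pvBlocks ls := by
  induction ls with
  | nil =>
      intro bs cur h
      simp [pvFin, pvBlocks, h]
  | cons l rest ih =>
      intro bs cur h
      by_cases hs : pvIsStart l = true
      · have h1 : ([l] : List String) ≠ [] := by simp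
        simp [pvStep, hs, h, pvBlocks, ih _ _ h1]
      · have h1 : cur ++ [l] ≠ [] := by simp
        simp [pvStep, hs, pvBlocks, ih _ _ h1]

theorem pvA_false (ls : List String) : ∀ (bs cur : List String),
    pvFin (ls.foldl pvStep (bs, cur, false)) = bs ++ pvBlocks ls := by
  induction ls with
  | nil => intro bs cur; simp [pvFin, pvBlocks]
  | cons l rest ih =>
      intro bs cur
      by_cases hs : pvIsStart l = true
      · have h1 : ([l] : List String) ≠ [] := by simp
        simp [pvStep, hs, pvBlocks, pvA_true rest _ _ h1]
      · simp [pvStep, hs, pvBlocks, ih]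

-- Nat-indexed start positions, structurally
def pvNatStarts : List String → List Nat
  | [] => []
  | l :: rest => (if pvIsStart l then [0] else []) ++ (pvNatStarts rest).map (· + 1)

-- B's computation with Nat indices
def pvCoreNat (ls : List String) : List String :=
  ((pvNatStarts ls).zip ((pvNatStarts ls).drop 1 ++ [ls.length])).map
    (fun p => PySem.Str.join "\n" ((ls.drop p.1).take (p.2 - p.1)))

theorem pvNatStarts_nil_iff (ls : List String) :
    pvNatStarts ls = [] ↔ ∀ l ∈ ls, pvIsStart l = false := by
  induction ls with
  | nil => simp [pvNatStarts]
  | cons l rest ih =>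
      by_cases hs : pvIsStart l = true
      · simp [pvNatStarts, hs]
      · simp only [pvNatStarts, hs, Bool.false_eq_true, if_false, List.nil_append,
          List.map_eq_nil_iff, ih, List.mem_cons]
        constructor
        · intro h x hx
          rcases hx with h1 | h2
          · subst h1; simpa using hs
          · exact h x h2
        · intro h x hx; exact h x (Or.inr hx)

theorem pvTakeWhile_all (ls : List String) (h : ∀ l ∈ ls, pvIsStart l = false) :
    ls.takeWhile (fun x => !pvIsStart x) = ls := by
  induction ls with
  | nil => simp
  | cons l rest ih =>
      have := h l (by simp)
      simp [this, ih (fun x hx => h x (by simp [hx]))]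

theorem pvTake_head_starts (ls : List String) : ∀ (a : Nat) (S : List Nat),
    pvNatStarts ls = a :: S → ls.take a = ls.takeWhile (fun x => !pvIsStart x) := by
  induction ls with
  | nil => intro a S h; simp [pvNatStarts] at h
  | cons l rest ih =>
      intro a S h
      by_cases hs : pvIsStart l = true
      · simp [pvNatStarts, hs] at h
        simp [h.1, hs]
      · simp [pvNatStarts, hs] at h
        cases hrest : pvNatStarts rest with
        | nil => rw [hrest] at h; simp at h
        | cons a' S' =>
            rw [hrest] at h
            simp at h
            rw [← h.1]
            simp [hs, ih a' S' hrest]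

theorem pvCoreNat_cons (l : String) (rest : List String) :
    pvCoreNat (l :: rest) =
      if pvIsStart l then
        PySem.Str.join "\n" (l :: rest.takeWhile (fun x => !pvIsStart x)) :: pvCoreNat rest
      else pvCoreNat rest := by
  by_cases hs : pvIsStart l = true
  · cases hrest : pvNatStarts rest with
    | nil =>
        have hall := (pvNatStarts_nil_iff rest).mp hrest
        simp [pvCoreNat, pvNatStarts, hs, hrest, pvTakeWhile_all rest hall]
    | cons a S =>
        have htake := pvTake_head_starts rest a S hrest
        simp only [pvCoreNat, pvNatStarts, hrest, hs, if_true, List.singleton_append,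
          List.length_cons, List.drop_one, List.tail_cons, List.map_cons]
        rw [show ((a + 1) :: S.map (· + 1) ++ [rest.length + 1] : List Nat) =
              ((a :: S) ++ [rest.length]).map (· + 1) by simp]
        rw [show ((0 : Nat) :: (a + 1) :: S.map (· + 1)) = 0 :: (a :: S).map (· + 1) by simp]
        rw [show (((a :: S) ++ [rest.length]).map (· + 1) : List Nat) =
              (a + 1) :: ((S ++ [rest.length]).map (· + 1)) by simp]
        rw [List.zip_cons_cons, List.map_cons]
        rw [show ((a :: S).map (· + 1) : List Nat) = (a + 1) :: S.map (· + 1) by simp]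
        rw [show ((a + 1) :: S.map (· + 1) : List Nat) = (a :: S).map (· + 1) by simp,
            show (((S ++ [rest.length]).map (· + 1)) : List Nat) = (S ++ [rest.length]).map (· + 1) from rfl]
        rw [List.zip_map, List.map_map]
        refine List.cons_eq_cons.mpr ⟨?_, ?_⟩
        · simp only [Nat.sub_zero, List.drop_zero, List.take_succ_cons, htake]
        · rw [show (a :: S).zip (S ++ [rest.length]) = (a :: S).zip ((a :: S).drop 1 ++ [rest.length]) by simp]
          apply List.map_congr_left
          intro p _
          simp [Prod.map, List.drop_succ_cons, Nat.add_sub_add_right]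
  · simp only [pvCoreNat, pvNatStarts, hs, Bool.false_eq_true, if_false, List.nil_append,
      List.length_cons]
    have hmap : (((pvNatStarts rest).map (· + 1)).drop 1 ++ [rest.length + 1] : List Nat) =
        ((pvNatStarts rest).drop 1 ++ [rest.length]).map (· + 1) := by
      rw [← List.map_drop]; simp
    rw [hmap, List.zip_map, List.map_map]
    apply List.map_congr_left
    intro p _
    simp [Prod.map, List.drop_succ_cons, Nat.add_sub_add_right]

theorem pvCoreNat_eq_pvBlocks (ls : List String) : pvCoreNat ls = pvBlocks ls := by
  induction ls with
  | nil => simp [pvCoreNat, pvNatStarts, pvBlocks]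
  | cons l rest ih =>
      rw [pvCoreNat_cons, pvBlocks]
      by_cases hs : pvIsStart l = true <;> simp [hs, ih]

-- B's Int start indices are the Nat ones, shifted by the enumerate offset
theorem pvStarts_eq (ls : List String) : ∀ (s : Int),
    ((PySem.List.enumerate ls s).filter (fun p => PySem.Str.startswith p.2 "data_")).map Prod.fst =
      (pvNatStarts ls).map (fun (k : Nat) => s + (k : Int)) := by
  induction ls with
  | nil => intro s; simp [PySem.List.enumerate_nil, pvNatStarts]
  | cons l rest ih =>
      intro s
      rw [PySem.List.enumerate_cons]
      by_cases hs : pvIsStart l = true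
      · rw [List.filter_cons_of_pos (by simpa [pvIsStart] using hs), List.map_cons, ih (s + 1)]
        simp only [pvNatStarts, hs, if_true, List.singleton_append, List.map_cons, List.map_map]
        refine List.cons_eq_cons.mpr ⟨by simp, ?_⟩
        apply List.map_congr_left
        intro k _
        simp only [Function.comp_apply]
        push_cast
        ring
      · rw [List.filter_cons_of_neg (by simpa [pvIsStart] using hs), ih (s + 1)]
        simp only [pvNatStarts, hs, Bool.false_eq_true, if_false, List.nil_append, List.map_map]
        apply List.map_congr_left
        intro k _
        simp only [Function.comp_apply]
        push_cast
        ring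

theorem pvCore_eq (ls : List String) :
    ((((PySem.List.enumerate ls 0).filter (fun p => PySem.Str.startswith p.2 "data_")).map Prod.fst).zip
        ((((PySem.List.enumerate ls 0).filter (fun p => PySem.Str.startswith p.2 "data_")).map Prod.fst).drop 1
          ++ [(ls.length : Int)])).map
      (fun p => PySem.Str.join "\n" (PySem.List.slice ls (some p.1) (some p.2))) = pvCoreNat ls := by
  have h0 : ((PySem.List.enumerate ls 0).filter (fun p => PySem.Str.startswith p.2 "data_")).map Prod.fst =
      (pvNatStarts ls).map (fun (k : Nat) => (k : Int)) := by
    rw [pvStarts_eq ls 0]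
    apply List.map_congr_left
    intro k _
    simp
  rw [h0]
  have hmap : (((pvNatStarts ls).map (fun (k : Nat) => (k : Int))).drop 1 ++ [(ls.length : Int)]) =
      ((pvNatStarts ls).drop 1 ++ [ls.length]).map (fun (k : Nat) => (k : Int)) := by
    rw [← List.map_drop]; simp
  rw [hmap, List.zip_map, List.map_map]
  apply List.map_congr_left
  intro p _
  simp only [Function.comp_apply, Prod.map, PySem.List.slice_natCast]

-- ===== VERDICT (by name: the statement is the Claim_ definition above) =====
theorem split_cif_blocks_py_spec : Claim_equal_split_cif_blocks_py := by
  intro content _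
  show split_cif_blocks_py content = split_cif_blocks_py_alt content
  unfold split_cif_blocks_py split_cif_blocks_py_alt
  simp only []
  rw [show (fun (s : List String × List String × Bool) line =>
        let line := PySem.Str.strip line
        if PySem.Str.startswith line "data_" then
          ((if s.2.2 && !s.2.1.isEmpty then s.1 ++ [PySem.Str.join "\n" s.2.1] else s.1), [line], true)
        else if s.2.2 then (s.1, s.2.1 ++ [line], s.2.2)
        else s) = (fun s line => pvStep s (PySem.Str.strip line)) from rfl]
  rw [← List.foldl_map]
  have hA := pvA_false ((pvSplitNL content).map PySem.Str.strip) [] []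
  simp only [pvFin] at hA
  rw [hA]
  rw [pvCore_eq ((pvSplitNL content).map PySem.Str.strip),
      pvCoreNat_eq_pvBlocks ((pvSplitNL content).map PySem.Str.strip)]
  simp
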